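-- pv_equiv track=rewrite | github.com/PolarisXQ/closeinteraction | process.py | merge_contact_pairs
-- ===== SOURCE A (Python) =====
-- def merge_contact_pairs(contact_pairs):
--     '''
--     1. merge same contact pairs
--     2. merge continuous contact pairs
--     3. find min max dist for each contact pair
--     '''
--     contact_pairs = sorted(contact_pairs, key=lambda x: x[2])
--     contact_pairs = sorted(contact_pairs, key=lambda x: x[0])
--     contact_pairs = sorted(contact_pairs, key=lambda x: x[1])
--     merged_contact_pairs = []
--     for cp in contact_pairs:
--         if len(merged_contact_pairs) == 0:
--             merged_contact_pairs.append(cp + [cp[4], cp[4]])  # Add min and max distance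
--         else:
--             last_cp = merged_contact_pairs[-1]
--             if cp[0] == last_cp[0] and cp[1] == last_cp[1] and cp[2] == last_cp[3] + 1:
--                 last_cp[3] = cp[3]
--                 last_cp[4] = min(last_cp[4], cp[4])  # Update min distance
--                 last_cp[5] = max(last_cp[5], cp[4])  # Update max distance
--             else:
--                 merged_contact_pairs.append(cp + [cp[4], cp[4]])  # Add min and max distance
--     return merged_contact_pairs
-- ===== SOURCE B (Python) =====
-- def merge_contact_pairs(contact_pairs):
--     '''
--     Bucket the pairs by (x[0], x[1]) in a dict, then walk the buckets in
--     (x[1], x[0]) key order, sorting each bucket by x[2] and merging its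
--     continuous runs while tracking min/max dist.
--     '''
--     buckets = {}
--     for cp in contact_pairs:
--         buckets.setdefault((cp[0], cp[1]), []).append(cp)
--     result = []
--     for key in sorted(buckets, key=lambda k: (k[1], k[0])):
--         merged = []
--         for cp in sorted(buckets[key], key=lambda x: x[2]):
--             if merged and cp[2] == merged[-1][3] + 1:
--                 last = merged[-1]
--                 last[3] = cp[3]
--                 last[4] = min(last[4], cp[4])
--                 last[5] = max(last[5], cp[4])
--             else:
--                 merged.append(cp + [cp[4], cp[4]])
--         result.extend(merged)
--     return result
-- ===== Notes on version B (the rewrite author's own statement) =====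
-- stated objective: alternative
-- what changed: Replaces A's three stable global sorts plus a single last-element-mutating scan with a dict that buckets pairs by (x[0],x[1]), iterating buckets in (x[1],x[0]) key order, sorting each bucket by x[2] and merging runs per bucket.
import Mathlib
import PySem

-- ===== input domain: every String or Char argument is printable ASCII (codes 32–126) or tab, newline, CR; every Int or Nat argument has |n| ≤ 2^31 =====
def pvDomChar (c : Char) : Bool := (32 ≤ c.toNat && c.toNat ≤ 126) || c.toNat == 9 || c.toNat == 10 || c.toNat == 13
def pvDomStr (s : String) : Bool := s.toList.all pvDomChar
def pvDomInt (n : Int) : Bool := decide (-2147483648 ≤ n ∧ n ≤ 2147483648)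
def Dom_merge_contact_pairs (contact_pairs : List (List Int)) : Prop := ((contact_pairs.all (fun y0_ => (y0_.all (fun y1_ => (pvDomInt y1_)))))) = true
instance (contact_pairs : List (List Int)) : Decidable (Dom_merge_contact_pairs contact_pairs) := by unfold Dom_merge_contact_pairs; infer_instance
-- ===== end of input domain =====

-- B replaces A's three stable global sorts + single merging scan by a dict bucketing pairs
-- by (x[0],x[1]), visited in (x[1],x[0]) key order, each bucket sorted by x[2] and merged
-- on its own (objective: alternative decomposition, same asymptotic cost).

-- ===== PORT A =====
def mcpStepA (acc : List (List Int)) (cp : List Int) : List (List Int) :=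
  if acc.length == 0 then
    acc ++ [cp ++ [PySem.List.pyGetD cp 4 0, PySem.List.pyGetD cp 4 0]]
  else
    let last_cp := PySem.List.pyGetD acc (-1) []
    if PySem.List.pyGetD cp 0 0 == PySem.List.pyGetD last_cp 0 0
        && PySem.List.pyGetD cp 1 0 == PySem.List.pyGetD last_cp 1 0
        && PySem.List.pyGetD cp 2 0 == PySem.List.pyGetD last_cp 3 0 + 1 then
      let l1 := PySem.List.pySetD last_cp 3 (PySem.List.pyGetD cp 3 0)
      let l2 := PySem.List.pySetD l1 4 (min (PySem.List.pyGetD l1 4 0) (PySem.List.pyGetD cp 4 0))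
      let l3 := PySem.List.pySetD l2 5 (max (PySem.List.pyGetD l2 5 0) (PySem.List.pyGetD cp 4 0))
      acc.dropLast ++ [l3]
    else
      acc ++ [cp ++ [PySem.List.pyGetD cp 4 0, PySem.List.pyGetD cp 4 0]]

def merge_contact_pairs (contact_pairs : List (List Int)) : List (List Int) :=
  let s1 := PySem.List.sorted contact_pairs (fun x => PySem.List.pyGetD x 2 0)
  let s2 := PySem.List.sorted s1 (fun x => PySem.List.pyGetD x 0 0)
  let s3 := PySem.List.sorted s2 (fun x => PySem.List.pyGetD x 1 0)
  s3.foldl mcpStepA []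

-- ===== PORT B =====
def mcpStepB (merged : List (List Int)) (cp : List Int) : List (List Int) :=
  if merged.length != 0
      && PySem.List.pyGetD cp 2 0 == PySem.List.pyGetD (PySem.List.pyGetD merged (-1) []) 3 0 + 1 then
    let last := PySem.List.pyGetD merged (-1) []
    let l1 := PySem.List.pySetD last 3 (PySem.List.pyGetD cp 3 0)
    let l2 := PySem.List.pySetD l1 4 (min (PySem.List.pyGetD l1 4 0) (PySem.List.pyGetD cp 4 0))
    let l3 := PySem.List.pySetD l2 5 (max (PySem.List.pyGetD l2 5 0) (PySem.List.pyGetD cp 4 0))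
    merged.dropLast ++ [l3]
  else
    merged ++ [cp ++ [PySem.List.pyGetD cp 4 0, PySem.List.pyGetD cp 4 0]]

def merge_contact_pairs_alt (contact_pairs : List (List Int)) : List (List Int) :=
  let buckets : PySem.Dict (Int × Int) (List (List Int)) :=
    contact_pairs.foldl
      (fun d cp =>
        d.modify (PySem.List.pyGetD cp 0 0, PySem.List.pyGetD cp 1 0) [] (fun grp => grp ++ [cp]))
      PySem.Dict.empty
  (PySem.List.sorted2 buckets.keys (fun k => k.2) (fun k => k.1)).foldl
    (fun result key =>
      result ++
        (PySem.List.sorted (buckets.getD key []) (fun x => PySem.List.pyGetD x 2 0)).foldl mcpStepB [])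
    []

-- ===== PRECONDITION & SPEC =====
-- Pre_ excludes exactly the inputs on which the Python A raises IndexError: a pair with
-- fewer than 5 entries (cp[4] is read for every pair).
def Pre_merge_contact_pairs (contact_pairs : List (List Int)) : Prop :=
  ∀ cp ∈ contact_pairs, 5 ≤ cp.length
instance (contact_pairs : List (List Int)) : Decidable (Pre_merge_contact_pairs contact_pairs) := by
  unfold Pre_merge_contact_pairs; infer_instance

def pvWitness_merge_contact_pairs : List (List Int) :=
  [[1, 2, 3, 4, 5], [2, 1, 4, 6, -1], [2, 1, 5, 7, 3]]

def Spec_merge_contact_pairs (contact_pairs : List (List Int)) (out : List (List Int)) : Prop :=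
  out = merge_contact_pairs_alt contact_pairs
instance (contact_pairs : List (List Int)) (out : List (List Int)) :
    Decidable (Spec_merge_contact_pairs contact_pairs out) := by
  unfold Spec_merge_contact_pairs; infer_instance

-- ===== CLAIM (what is proved, stated in full; the proofs are below) =====
def Claim_equal_merge_contact_pairs : Prop :=
  ∀ (contact_pairs : List (List Int)), Dom_merge_contact_pairs contact_pairs →
    Pre_merge_contact_pairs contact_pairs →
    Spec_merge_contact_pairs contact_pairs (merge_contact_pairs contact_pairs)

-- ===== LEMMAS AND PROOFS =====

def mcpG0 (cp : List Int) : Int := PySem.List.pyGetD cp 0 0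
def mcpG1 (cp : List Int) : Int := PySem.List.pyGetD cp 1 0
def mcpG2 (cp : List Int) : Int := PySem.List.pyGetD cp 2 0

theorem ins_filter {α : Type} (key : α → Int) (k : Int) (x : α) (ys : List α)
    (h : ys.Pairwise (fun a b => key a ≤ key b)) :
    (PySem.List.insertBy (fun a b => decide (key a < key b)) x ys).filter (fun y => key y == k)
      = ys.filter (fun y => key y == k) ++ if key x == k then [x] else [] := by
  induction ys with
  | nil =>
    by_cases hk : key x = k <;> simp [PySem.List.insertBy, hk]
  | cons y ys ih =>
    rw [List.pairwise_cons] at h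
    simp only [PySem.List.insertBy]
    by_cases hlt : key x < key y
    · simp only [hlt, decide_true, if_true]
      by_cases hk : (key x == k) = true
      · have hxk : key x = k := by simpa using hk
        have hnil : (y :: ys).filter (fun w => key w == k) = [] := by
          rw [List.filter_eq_nil_iff]
          intro z hz
          have hyz : key y ≤ key z := by
            rcases List.mem_cons.1 hz with h' | h'
            · exact h' ▸ le_refl _
            · exact h.1 _ h'
          simp only [beq_iff_eq]; omega
        rw [List.filter_cons, if_pos hk, hnil]
        simp [hk]
      · rw [List.filter_cons, if_neg hk]
        simp [hk]
    · simp only [hlt, decide_false, Bool.false_eq_true, if_false]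
      rw [List.filter_cons, List.filter_cons, ih h.2]
      by_cases hy : (key y == k) = true <;> simp [hy]

theorem sorted_append_singleton {α : Type} (key : α → Int) (ys : List α) (x : α) :
    PySem.List.sorted (ys ++ [x]) key
      = PySem.List.insertBy (fun a b => decide (key a < key b)) x (PySem.List.sorted ys key) := by
  rw [PySem.List.sorted_eq_foldl_insertBy, PySem.List.sorted_eq_foldl_insertBy, List.foldl_append]
  rfl

theorem sorted_filter_stable_aux {α : Type} (key : α → Int) (k : Int) :
    ∀ (xs ys : List α),
      (PySem.List.sorted (ys ++ xs) key).filter (fun y => key y == k)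
        = (PySem.List.sorted ys key).filter (fun y => key y == k) ++ xs.filter (fun y => key y == k) := by
  intro xs
  induction xs with
  | nil => intro ys; simp
  | cons x xs ih =>
    intro ys
    have h1 : ys ++ x :: xs = (ys ++ [x]) ++ xs := by simp
    rw [h1, ih (ys ++ [x]), sorted_append_singleton,
        ins_filter key k x _ (PySem.List.sorted_pairwise ys key)]
    rw [List.filter_cons]
    by_cases hx : key x == k <;> simp [hx]

theorem sorted_filter_stable {α : Type} (key : α → Int) (k : Int) (xs : List α) :
    (PySem.List.sorted xs key).filter (fun y => key y == k) = xs.filter (fun y => key y == k) := by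
  have := sorted_filter_stable_aux key k xs []
  simpa using this

theorem canon_unique {α : Type} (key : α → Int) :
    ∀ (ys zs : List α), ys.Pairwise (fun a b => key a ≤ key b) →
      zs.Pairwise (fun a b => key a ≤ key b) →
      (∀ c : Int, ys.filter (fun y => key y == c) = zs.filter (fun y => key y == c)) →
      ys = zs := by
  intro ys
  induction ys with
  | nil =>
    intro zs _ _ h
    cases zs with
    | nil => rfl
    | cons z zs =>
      have := h (key z)
      simp [List.filter_cons] at this
  | cons y ys ih =>
    intro zs hy hz h
    cases zs with
    | nil =>
      have := h (key y)
      simp [List.filter_cons] at this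
    | cons z zs =>
      rw [List.pairwise_cons] at hy hz
      have hyz : key y = key z := by
        have h1 := h (key z)
        have h2 := h (key y)
        -- filter (y::ys) at key z is nonempty
        have hne1 : ((y :: ys).filter (fun w => key w == key z)) ≠ [] := by
          rw [h1]; simp [List.filter_cons]
        have hge : key y ≤ key z := by
          rcases List.exists_mem_of_ne_nil _ hne1 with ⟨w, hw⟩
          have hw' := List.mem_filter.1 hw
          have : key w = key z := by simpa using hw'.2
          rcases hw'.1 with _ | hmem
          · omega
          · have := hy.1 _ (by assumption); omega
        have hne2 : ((z :: zs).filter (fun w => key w == key y)) ≠ [] := by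
          rw [← h2]; simp [List.filter_cons]
        have hle : key z ≤ key y := by
          rcases List.exists_mem_of_ne_nil _ hne2 with ⟨w, hw⟩
          have hw' := List.mem_filter.1 hw
          have : key w = key y := by simpa using hw'.2
          rcases hw'.1 with _ | hmem
          · omega
          · have := hz.1 _ (by assumption); omega
        omega
      have hheads := h (key y)
      simp only [List.filter_cons, beq_iff_eq] at hheads
      rw [if_pos trivial, if_pos hyz.symm] at hheads
      have hyzeq : y = z := by exact List.head_eq_of_cons_eq hheads
      have htails : ∀ c : Int, ys.filter (fun w => key w == c) = zs.filter (fun w => key w == c) := by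
        intro c
        by_cases hc : c = key y
        · subst hc
          exact List.tail_eq_of_cons_eq hheads
        · have := h c
          simp only [List.filter_cons, beq_iff_eq] at this ⊢
          rw [if_neg (by omega), if_neg (by omega)] at this
          exact this
      rw [hyzeq, ih zs hy.2 hz.2 htails]

theorem pairwise_of_filter {α : Type} (ka kb : α → Int) :
    ∀ zs : List α, zs.Pairwise (fun a b => ka a ≤ ka b) →
      (∀ c : Int, (zs.filter (fun y => ka y == c)).Pairwise (fun a b => kb a ≤ kb b)) →
      zs.Pairwise (fun a b => ka a ≤ ka b ∧ (ka a = ka b → kb a ≤ kb b)) := by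
  intro zs
  induction zs with
  | nil => intro _ _; exact List.Pairwise.nil
  | cons z t ih =>
    intro hpw hf
    rw [List.pairwise_cons] at hpw
    constructor
    · intro y hy
      refine ⟨hpw.1 y hy, fun heq => ?_⟩
      have h := hf (ka z)
      rw [List.filter_cons, if_pos (by simp)] at h
      rw [List.pairwise_cons] at h
      exact h.1 y (List.mem_filter.2 ⟨hy, by simp [heq]⟩)
    · apply ih hpw.2
      intro c
      have h := hf c
      rw [List.filter_cons] at h
      by_cases hz : ka z == c
      · rw [if_pos hz] at h; exact (List.pairwise_cons.1 h).2
      · rw [if_neg hz] at h; exact h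

theorem enc_le (M B a1 b1 a2 b2 : Int) (hM : 2*B < M)
    (h11 : -B ≤ b1) (h12 : b1 ≤ B) (h21 : -B ≤ b2) (h22 : b2 ≤ B)
    (h : a1 ≤ a2) (h2 : a1 = a2 → b1 ≤ b2) : a1*M + b1 ≤ a2*M + b2 := by
  rcases lt_or_eq_of_le h with hlt | heq
  · have h1 : a1 + 1 ≤ a2 := by omega
    have h3 : (a1+1)*M ≤ a2*M := by
      apply mul_le_mul_of_nonneg_right h1 (by omega)
    nlinarith
  · subst heq; have := h2 rfl; nlinarith

theorem enc_eq (M B a1 b1 a2 b2 : Int) (hM : 2*B < M)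
    (h11 : -B ≤ b1) (h12 : b1 ≤ B) (h21 : -B ≤ b2) (h22 : b2 ≤ B)
    (h : a1*M + b1 = a2*M + b2) : a1 = a2 ∧ b1 = b2 := by
  rcases lt_trichotomy a1 a2 with hlt | heq | hgt
  · have h1 : a1 + 1 ≤ a2 := by omega
    have h3 : (a1+1)*M ≤ a2*M := mul_le_mul_of_nonneg_right h1 (by omega)
    nlinarith
  · constructor
    · exact heq
    · subst heq; omega
  · have h1 : a2 + 1 ≤ a1 := by omega
    have h3 : (a2+1)*M ≤ a1*M := mul_le_mul_of_nonneg_right h1 (by omega)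
    nlinarith

theorem chain_sorted {α : Type} (xs : List α) (ka kb : α → Int) (M B : Int)
    (hM : 2*B < M) (hb : ∀ x ∈ xs, -B ≤ kb x ∧ kb x ≤ B) :
    PySem.List.sorted (PySem.List.sorted xs kb) ka
      = PySem.List.sorted xs (fun x => ka x * M + kb x) := by
  have hmemL : ∀ y ∈ PySem.List.sorted (PySem.List.sorted xs kb) ka, y ∈ xs := by
    intro y hy
    exact (PySem.List.mem_sorted xs kb false y).1
      ((PySem.List.mem_sorted _ ka false y).1 hy)
  apply canon_unique (fun x => ka x * M + kb x)
  · have pwA := PySem.List.sorted_pairwise (PySem.List.sorted xs kb) ka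
    have hf : ∀ c : Int,
        ((PySem.List.sorted (PySem.List.sorted xs kb) ka).filter
          (fun y => ka y == c)).Pairwise (fun a b => kb a ≤ kb b) := by
      intro c
      rw [sorted_filter_stable]
      exact (PySem.List.sorted_pairwise xs kb).filter _
    have pwLex := pairwise_of_filter ka kb _ pwA hf
    refine pwLex.imp_of_mem ?_
    intro a b ha hb' hab
    have hax := hmemL a ha
    have hbx := hmemL b hb'
    exact enc_le M B _ _ _ _ hM (hb a hax).1 (hb a hax).2 (hb b hbx).1 (hb b hbx).2 hab.1 hab.2
  · exact PySem.List.sorted_pairwise xs _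
  · intro c
    rw [sorted_filter_stable (fun x => ka x * M + kb x) c xs]
    by_cases hex : ∃ x ∈ xs, ka x * M + kb x = c
    · obtain ⟨x₀, hx₀, hc⟩ := hex
      have hpt : ∀ x ∈ xs,
          ((ka x * M + kb x == c) : Bool) = (kb x == kb x₀ && ka x == ka x₀) := by
        intro x hx
        by_cases h1 : ka x * M + kb x = c
        · have h3 := enc_eq M B (ka x) (kb x) (ka x₀) (kb x₀) hM
            (hb x hx).1 (hb x hx).2 (hb x₀ hx₀).1 (hb x₀ hx₀).2 (h1.trans hc.symm)
          simp [beq_iff_eq, h1, h3.1, h3.2, hc]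
        · have h2 : ¬(kb x = kb x₀ ∧ ka x = ka x₀) := by
            rintro ⟨e1, e2⟩
            exact h1 (by rw [e1, e2, hc])
          by_cases e1 : kb x = kb x₀ <;> by_cases e2 : ka x = ka x₀
          · exact absurd ⟨e1, e2⟩ h2
          all_goals
            rw [show ((ka x * M + kb x == c)) = false from by simp [beq_iff_eq, h1]]
            simp [beq_iff_eq, e1, e2]
      calc (PySem.List.sorted (PySem.List.sorted xs kb) ka).filter (fun y => ka y * M + kb y == c)
          = (PySem.List.sorted (PySem.List.sorted xs kb) ka).filter
              (fun y => kb y == kb x₀ && ka y == ka x₀) :=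
            List.filter_congr (fun x hx => hpt x (hmemL x hx))
        _ = ((PySem.List.sorted (PySem.List.sorted xs kb) ka).filter
              (fun y => ka y == ka x₀)).filter (fun y => kb y == kb x₀) := by
            rw [List.filter_filter]
        _ = ((PySem.List.sorted xs kb).filter (fun y => ka y == ka x₀)).filter
              (fun y => kb y == kb x₀) := by rw [sorted_filter_stable]
        _ = ((PySem.List.sorted xs kb).filter (fun y => kb y == kb x₀)).filter
              (fun y => ka y == ka x₀) := by
            rw [List.filter_filter, List.filter_filter]
            exact List.filter_congr (fun x _ => Bool.and_comm _ _)
        _ = (xs.filter (fun y => kb y == kb x₀)).filter (fun y => ka y == ka x₀) := by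
            rw [sorted_filter_stable]
        _ = xs.filter (fun y => kb y == kb x₀ && ka y == ka x₀) := by
            rw [List.filter_filter]
            exact List.filter_congr (fun x _ => Bool.and_comm _ _)
        _ = xs.filter (fun y => ka y * M + kb y == c) :=
            (List.filter_congr (fun x hx => (hpt x hx).symm))
    · push Not at hex
      rw [List.filter_eq_nil_iff.2, List.filter_eq_nil_iff.2]
      · intro z hz; simpa using hex z hz
      · intro z hz; simpa using hex z (hmemL z hz)

def mcpKP (cp : List Int) : Int × Int := (mcpG0 cp, mcpG1 cp)
def mcpEncP (g : Int × Int) : Int := g.2 * 8589934592 + g.1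
def mcpK (cp : List Int) : Int :=
  mcpG1 cp * 73786976294838206464 + (mcpG0 cp * 8589934592 + mcpG2 cp)
def mcpGroups (xs : List (List Int)) : List (Int × Int) :=
  PySem.List.sorted (PySem.List.dedup (xs.map mcpKP)) mcpEncP
def mcpGrp (xs : List (List Int)) (g : Int × Int) : List (List Int) :=
  PySem.List.sorted (xs.filter (fun cp => mcpKP cp == g)) mcpG2

def mcpBnd (xs : List (List Int)) : Prop :=
  ∀ cp ∈ xs, ∀ v ∈ cp, -2147483648 ≤ v ∧ v ≤ 2147483648

theorem pyGetD_int_bound (cp : List Int) (i : Int)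
    (h : ∀ v ∈ cp, -2147483648 ≤ v ∧ v ≤ 2147483648) :
    -2147483648 ≤ PySem.List.pyGetD cp i 0 ∧ PySem.List.pyGetD cp i 0 ≤ 2147483648 := by
  cases hg : PySem.List.pyGet? cp i with
  | some v =>
    have hv : v ∈ cp := PySem.List.mem_of_pyGet?_eq_some cp hg
    have := h v hv
    simp [PySem.List.pyGetD, hg, this]
  | none => simp [PySem.List.pyGetD, hg]

theorem mcpG_bound (xs : List (List Int)) (hdom : mcpBnd xs) :
    ∀ cp ∈ xs,
      (-2147483648 ≤ mcpG0 cp ∧ mcpG0 cp ≤ 2147483648) ∧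
      (-2147483648 ≤ mcpG1 cp ∧ mcpG1 cp ≤ 2147483648) ∧
      (-2147483648 ≤ mcpG2 cp ∧ mcpG2 cp ≤ 2147483648) := by
  intro cp hcp
  exact ⟨pyGetD_int_bound cp 0 (hdom cp hcp), pyGetD_int_bound cp 1 (hdom cp hcp),
    pyGetD_int_bound cp 2 (hdom cp hcp)⟩

theorem triple_eq_sortedK (xs : List (List Int)) (hdom : mcpBnd xs) :
    PySem.List.sorted (PySem.List.sorted (PySem.List.sorted xs mcpG2) mcpG0) mcpG1
      = PySem.List.sorted xs mcpK := by
  rw [chain_sorted xs mcpG0 mcpG2 8589934592 2147483648 (by norm_num)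
    (fun x hx => (mcpG_bound xs hdom x hx).2.2)]
  rw [chain_sorted xs mcpG1 (fun x => mcpG0 x * 8589934592 + mcpG2 x)
    73786976294838206464 18446744075857035264 (by norm_num)
    (fun x hx => by
      have h := mcpG_bound xs hdom x hx
      constructor <;> nlinarith [h.1.1, h.1.2, h.2.2.1, h.2.2.2])]
  rfl

theorem pairwise_flatMap' {α β : Type} (R : α → α → Prop) (f : β → List α) (l : List β)
    (h1 : ∀ g ∈ l, (f g).Pairwise R)
    (h2 : l.Pairwise (fun g g' => ∀ x ∈ f g, ∀ y ∈ f g', R x y)) :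
    (l.flatMap f).Pairwise R := by
  induction l with
  | nil => simp
  | cons g l ih =>
    rw [List.flatMap_cons, List.pairwise_append]
    rw [List.pairwise_cons] at h2
    refine ⟨h1 g (by simp), ih (fun g' hg' => h1 g' (by simp [hg'])) h2.2, ?_⟩
    intro x hx y hy
    rw [List.mem_flatMap] at hy
    obtain ⟨g', hg', hyg⟩ := hy
    exact h2.1 g' hg' x hx y hyg

theorem flatMap_single {β α : Type} (l : List β) (F : β → List α) (g₀ : β)
    (hnd : l.Nodup) (hg : g₀ ∈ l) (h : ∀ g ∈ l, g ≠ g₀ → F g = []) :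
    l.flatMap F = F g₀ := by
  induction l with
  | nil => simp at hg
  | cons g l ih =>
    rw [List.flatMap_cons]
    rcases List.mem_cons.1 hg with heq | hmem
    · subst heq
      have : ∀ g' ∈ l, F g' = [] := by
        intro g' hg'
        exact h g' (by simp [hg']) (fun e => (List.nodup_cons.1 hnd).1 (e ▸ hg'))
      have hnil : l.flatMap F = [] := by
        rw [List.flatMap_eq_nil_iff]
        exact this
      simp [hnil]
    · rw [h g (by simp) (fun e => (List.nodup_cons.1 hnd).1 (e ▸ hmem)),
        ih (List.nodup_cons.1 hnd).2 hmem (fun g' hg' => h g' (by simp [hg']))]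
      simp

theorem filter_flatMap' {α β : Type} (p : α → Bool) (F : β → List α) (l : List β) :
    (l.flatMap F).filter p = l.flatMap (fun g => (F g).filter p) := by
  induction l with
  | nil => simp
  | cons g l ih => rw [List.flatMap_cons, List.flatMap_cons, List.filter_append, ih]

theorem mcpK_eq (cp : List Int) :
    mcpK cp = mcpEncP (mcpKP cp) * 8589934592 + mcpG2 cp := by
  unfold mcpK mcpEncP mcpKP; ring

theorem flatMap_congr_mem {β α : Type} (l : List β) (F G : β → List α)
    (h : ∀ g ∈ l, F g = G g) : l.flatMap F = l.flatMap G := by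
  induction l with
  | nil => rfl
  | cons g l ih =>
    rw [List.flatMap_cons, List.flatMap_cons, h g (by simp),
      ih (fun g' hg' => h g' (by simp [hg']))]

theorem mem_grp {xs : List (List Int)} {g : Int × Int} {y : List Int}
    (h : y ∈ mcpGrp xs g) : y ∈ xs ∧ mcpKP y = g := by
  have h1 := (PySem.List.mem_sorted _ _ _ _).1 h
  have h2 := List.mem_filter.1 h1
  exact ⟨h2.1, by simpa using h2.2⟩

theorem mem_groups {xs : List (List Int)} {g : Int × Int} :
    g ∈ mcpGroups xs ↔ ∃ cp ∈ xs, mcpKP cp = g := by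
  unfold mcpGroups
  rw [PySem.List.mem_sorted, PySem.List.mem_dedup, List.mem_map]

theorem mcpK_inj {x y : List Int}
    (hx0 : -2147483648 ≤ mcpG0 x ∧ mcpG0 x ≤ 2147483648)
    (hx1 : -2147483648 ≤ mcpG1 x ∧ mcpG1 x ≤ 2147483648)
    (hx2 : -2147483648 ≤ mcpG2 x ∧ mcpG2 x ≤ 2147483648)
    (hy0 : -2147483648 ≤ mcpG0 y ∧ mcpG0 y ≤ 2147483648)
    (hy1 : -2147483648 ≤ mcpG1 y ∧ mcpG1 y ≤ 2147483648)
    (hy2 : -2147483648 ≤ mcpG2 y ∧ mcpG2 y ≤ 2147483648)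
    (h : mcpK x = mcpK y) : mcpKP x = mcpKP y := by
  unfold mcpK at h
  unfold mcpKP
  have h1 : mcpG1 x = mcpG1 y ∧ mcpG0 x = mcpG0 y := by omega
  rw [h1.1, h1.2]

theorem encP_inj {g g' : Int × Int}
    (hg1 : -2147483648 ≤ g.1 ∧ g.1 ≤ 2147483648)
    (hg2 : -2147483648 ≤ g.2 ∧ g.2 ≤ 2147483648)
    (hg1' : -2147483648 ≤ g'.1 ∧ g'.1 ≤ 2147483648)
    (hg2' : -2147483648 ≤ g'.2 ∧ g'.2 ≤ 2147483648)
    (h : mcpEncP g = mcpEncP g') : g = g' := by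
  unfold mcpEncP at h
  have : g.1 = g'.1 ∧ g.2 = g'.2 := by omega
  exact Prod.ext this.1 this.2

theorem groups_bound {xs : List (List Int)} (hdom : mcpBnd xs) {g : Int × Int}
    (hg : g ∈ mcpGroups xs) :
    (-2147483648 ≤ g.1 ∧ g.1 ≤ 2147483648) ∧ (-2147483648 ≤ g.2 ∧ g.2 ≤ 2147483648) ∧
    (-18446744075857035264 ≤ mcpEncP g ∧ mcpEncP g ≤ 18446744075857035264) := by
  obtain ⟨cp, hcp, rfl⟩ := mem_groups.1 hg
  have h := mcpG_bound xs hdom cp hcp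
  unfold mcpKP mcpEncP
  refine ⟨⟨h.1.1, h.1.2⟩, ⟨h.2.1.1, h.2.1.2⟩, ?_, ?_⟩ <;> simp <;> nlinarith [h.1.1, h.1.2, h.2.1.1, h.2.1.2]

theorem flat_eq_sortedK (xs : List (List Int)) (hdom : mcpBnd xs) :
    (mcpGroups xs).flatMap (mcpGrp xs) = PySem.List.sorted xs mcpK := by
  have hndgroups : (mcpGroups xs).Nodup :=
    (PySem.List.sorted_perm (PySem.List.dedup (xs.map mcpKP)) mcpEncP false).symm.nodup
      (PySem.List.nodup_dedup _)
  apply canon_unique mcpK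
  · apply pairwise_flatMap'
    · intro g _
      refine (PySem.List.sorted_pairwise _ mcpG2).imp_of_mem ?_
      intro a b ha hb hle
      have ha' := mem_grp (xs := xs) (g := g) ha
      have hb' := mem_grp (xs := xs) (g := g) hb
      rw [mcpK_eq, mcpK_eq, ha'.2, hb'.2]
      omega
    · have hpw := PySem.List.sorted_pairwise (PySem.List.dedup (xs.map mcpKP)) mcpEncP
      have hcomb := hpw.and hndgroups
      refine hcomb.imp_of_mem ?_
      rintro g g' hgm hgm' ⟨hle, hne⟩ x hx y hy
      have hbg := groups_bound hdom hgm
      have hbg' := groups_bound hdom hgm'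
      have hlt : mcpEncP g < mcpEncP g' := by
        rcases lt_or_eq_of_le hle with h | h
        · exact h
        · exact absurd (encP_inj hbg.1 hbg.2.1 hbg'.1 hbg'.2.1 h) hne
      have hx' := mem_grp (xs := xs) (g := g) hx
      have hy' := mem_grp (xs := xs) (g := g') hy
      have hbx := (mcpG_bound xs hdom x hx'.1).2.2
      have hby := (mcpG_bound xs hdom y hy'.1).2.2
      rw [mcpK_eq, mcpK_eq, hx'.2, hy'.2]
      exact enc_le 8589934592 2147483648 _ _ _ _ (by norm_num) hbx.1 hbx.2 hby.1 hby.2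
        (le_of_lt hlt) (fun h => absurd h (ne_of_lt hlt))
  · exact PySem.List.sorted_pairwise xs mcpK
  · intro c
    rw [sorted_filter_stable mcpK c xs, filter_flatMap']
    by_cases hex : ∃ x₀ ∈ xs, mcpK x₀ = c
    · obtain ⟨x₀, hx₀, hc⟩ := hex
      have hKinj : ∀ y ∈ xs, mcpK y = c → mcpKP y = mcpKP x₀ := by
        intro y hy hyc
        have h1 := mcpG_bound xs hdom y hy
        have h2 := mcpG_bound xs hdom x₀ hx₀
        exact mcpK_inj h1.1 h1.2.1 h1.2.2 h2.1 h2.2.1 h2.2.2 (hyc.trans hc.symm)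
      have hgrpf : ∀ g : Int × Int,
          (mcpGrp xs g).filter (fun y => mcpK y == c)
            = xs.filter (fun y => mcpKP y == g && mcpK y == c) := by
        intro g
        unfold mcpGrp
        have e1 : (PySem.List.sorted (xs.filter (fun cp => mcpKP cp == g)) mcpG2).filter
              (fun y => mcpK y == c)
            = (PySem.List.sorted (xs.filter (fun cp => mcpKP cp == g)) mcpG2).filter
              (fun y => mcpG2 y == c - mcpEncP g * 8589934592) := by
          apply List.filter_congr
          intro y hy
          have hy' : mcpKP y = g := by
            have := List.mem_filter.1 ((PySem.List.mem_sorted _ _ _ _).1 hy)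
            simpa using this.2
          rw [show (mcpK y == c) = decide (mcpK y = c) from rfl,
            show (mcpG2 y == c - mcpEncP g * 8589934592)
              = decide (mcpG2 y = c - mcpEncP g * 8589934592) from rfl]
          rw [decide_eq_decide]
          rw [mcpK_eq, hy']
          omega
        rw [e1, sorted_filter_stable, List.filter_filter]
        apply List.filter_congr
        intro y _
        by_cases hkp : mcpKP y = g
        · rw [show (mcpG2 y == c - mcpEncP g * 8589934592)
              = decide (mcpG2 y = c - mcpEncP g * 8589934592) from rfl]
          simp only [hkp, beq_self_eq_true, Bool.and_true, Bool.true_and]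
          rw [show (mcpK y == c) = decide (mcpK y = c) from rfl, decide_eq_decide]
          rw [mcpK_eq, hkp]
          omega
        · have hf : (mcpKP y == g) = false := by
            simpa using hkp
          simp [hf]
      have hempty : ∀ g ∈ mcpGroups xs, g ≠ mcpKP x₀ →
          xs.filter (fun y => mcpKP y == g && mcpK y == c) = [] := by
        intro g hg hne
        rw [List.filter_eq_nil_iff]
        intro y hy hmem
        simp only [Bool.and_eq_true, beq_iff_eq] at hmem
        exact hne ((hmem.1).symm.trans (hKinj y hy hmem.2))
      rw [flatMap_congr_mem _ _ _ (fun g _ => hgrpf g),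
        flatMap_single _ _ (mcpKP x₀) hndgroups (mem_groups.2 ⟨x₀, hx₀, rfl⟩) hempty]
      apply List.filter_congr
      intro y hy
      by_cases hyc : mcpK y = c
      · simp [beq_iff_eq, hyc, hKinj y hy hyc]
      · simp [beq_iff_eq, hyc]
    · push Not at hex
      rw [List.filter_eq_nil_iff.2 (fun z hz => by simpa using hex z hz)]
      rw [List.flatMap_eq_nil_iff]
      intro g hg
      rw [List.filter_eq_nil_iff]
      intro y hy
      simpa using hex y (mem_grp (xs := xs) (g := g) hy).1



-- == B-side massage: dict buckets are filters; sorted2 by (k.2,k.1) is sorted by mcpEncP ==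

theorem insertBy_congr {α : Type} (b1 b2 : α → α → Bool) (x : α) :
    ∀ ys : List α, (∀ y ∈ ys, b1 x y = b2 x y) →
      PySem.List.insertBy b1 x ys = PySem.List.insertBy b2 x ys := by
  intro ys
  induction ys with
  | nil => intro _; rfl
  | cons y ys ih =>
    intro h
    simp only [PySem.List.insertBy]
    rw [h y (by simp)]
    by_cases hb : b2 x y = true
    · simp [hb]
    · simp only [hb, Bool.false_eq_true, if_false]
      rw [ih (fun y' hy' => h y' (by simp [hy']))]

theorem foldl_insertBy_congr {α : Type} (P : α → Prop) (b1 b2 : α → α → Bool)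
    (hxx : ∀ x y, P x → P y → b1 x y = b2 x y) :
    ∀ (xs acc : List α), (∀ x ∈ xs, P x) → (∀ y ∈ acc, P y) →
      xs.foldl (fun acc x => PySem.List.insertBy b1 x acc) acc
        = xs.foldl (fun acc x => PySem.List.insertBy b2 x acc) acc := by
  intro xs
  induction xs with
  | nil => intro acc _ _; rfl
  | cons x xs ih =>
    intro acc hxs hacc
    rw [List.foldl_cons, List.foldl_cons,
      insertBy_congr b1 b2 x acc (fun y hy => hxx x y (hxs x (by simp)) (hacc y hy))]
    apply ih _ (fun x' hx' => hxs x' (by simp [hx']))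
    intro y hy
    rcases (PySem.List.mem_insertBy _ _ _ _).1 hy with rfl | hy'
    · exact hxs y (by simp)
    · exact hacc y hy'

theorem before_eq_encP (g g' : Int × Int)
    (hg : (-2147483648 ≤ g.1 ∧ g.1 ≤ 2147483648) ∧ (-2147483648 ≤ g.2 ∧ g.2 ≤ 2147483648))
    (hg' : (-2147483648 ≤ g'.1 ∧ g'.1 ≤ 2147483648) ∧ (-2147483648 ≤ g'.2 ∧ g'.2 ≤ 2147483648)) :
    (decide (g.2 < g'.2) || (!decide (g'.2 < g.2) && decide (g.1 < g'.1)))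
      = decide (mcpEncP g < mcpEncP g') := by
  unfold mcpEncP
  by_cases h1 : g.2 < g'.2 <;> by_cases h2 : g'.2 < g.2 <;> by_cases h3 : g.1 < g'.1 <;>
    simp [h1, h2, h3] <;> omega

theorem sorted2_eq_sorted_encP (keys : List (Int × Int))
    (hb : ∀ g ∈ keys,
      (-2147483648 ≤ g.1 ∧ g.1 ≤ 2147483648) ∧ (-2147483648 ≤ g.2 ∧ g.2 ≤ 2147483648)) :
    PySem.List.sorted2 keys (fun k => k.2) (fun k => k.1) = PySem.List.sorted keys mcpEncP := by
  rw [PySem.List.sorted_eq_foldl_insertBy]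
  show keys.foldl (fun acc x => PySem.List.insertBy
      (fun a b => decide (a.2 < b.2) || (!decide (b.2 < a.2) && decide (a.1 < b.1))) x acc) []
    = keys.foldl (fun acc x => PySem.List.insertBy
      (fun a b => decide (mcpEncP a < mcpEncP b)) x acc) []
  exact foldl_insertBy_congr
    (fun g => (-2147483648 ≤ g.1 ∧ g.1 ≤ 2147483648) ∧ (-2147483648 ≤ g.2 ∧ g.2 ≤ 2147483648))
    _ _ before_eq_encP keys [] hb (by simp)

theorem buckets_getD (xs : List (List Int)) (g : Int × Int) :
    (xs.foldl (fun d cp =>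
        d.modify (PySem.List.pyGetD cp 0 0, PySem.List.pyGetD cp 1 0) [] (fun grp => grp ++ [cp]))
      PySem.Dict.empty).getD g []
      = xs.filter (fun cp => mcpKP cp == g) := by
  show (xs.foldl (fun d cp => d.modify (mcpKP cp) [] (fun grp => grp ++ [cp]))
      PySem.Dict.empty).getD g [] = _
  have h1 : (xs.foldl (fun d cp => d.modify (mcpKP cp) [] (fun grp => grp ++ [cp]))
      PySem.Dict.empty)
      = ((xs.map (fun cp => (mcpKP cp, cp))).foldl
          (fun d p => d.modify p.1 [] (fun grp => grp ++ [p.2])) PySem.Dict.empty) := by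
    rw [List.foldl_map]
  rw [h1, PySem.Dict.getD_foldl_modify_append, List.filter_map, List.map_map]
  simp [Function.comp_def]

theorem buckets_keys (xs : List (List Int)) :
    (xs.foldl (fun d cp =>
        d.modify (PySem.List.pyGetD cp 0 0, PySem.List.pyGetD cp 1 0) [] (fun grp => grp ++ [cp]))
      PySem.Dict.empty).keys
      = PySem.List.dedup (xs.map mcpKP) := by
  show (xs.foldl (fun d cp => d.modify (mcpKP cp) [] (fun grp => grp ++ [cp]))
      PySem.Dict.empty).keys = _
  rw [PySem.Dict.keys_foldl_modify_key xs mcpKP [] (fun _ cp => fun grp => grp ++ [cp])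
    PySem.Dict.empty]
  rw [PySem.Dict.keys_empty, PySem.List.dedup_eq_ofList, PySem.Set.ofList_eq_foldl]
  rfl

theorem alt_eq_flat (xs : List (List Int)) (hdom : mcpBnd xs) :
    merge_contact_pairs_alt xs
      = (mcpGroups xs).flatMap (fun g => (mcpGrp xs g).foldl mcpStepB []) := by
  show (PySem.List.sorted2
      ((xs.foldl (fun d cp =>
          d.modify (PySem.List.pyGetD cp 0 0, PySem.List.pyGetD cp 1 0) []
            (fun grp => grp ++ [cp])) PySem.Dict.empty).keys)
      (fun k => k.2) (fun k => k.1)).foldl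
      (fun result key => result ++
        (PySem.List.sorted
          ((xs.foldl (fun d cp =>
              d.modify (PySem.List.pyGetD cp 0 0, PySem.List.pyGetD cp 1 0) []
                (fun grp => grp ++ [cp])) PySem.Dict.empty).getD key [])
          (fun x => PySem.List.pyGetD x 2 0)).foldl mcpStepB []) []
    = _
  rw [buckets_keys]
  rw [sorted2_eq_sorted_encP _ (fun g hg => by
    rcases List.mem_map.1 ((PySem.List.mem_dedup _ _).1 hg) with ⟨cp, hcp, rfl⟩
    have h := mcpG_bound xs hdom cp hcp
    exact ⟨h.1, h.2.1⟩)]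
  rw [PySem.List.foldl_append_eq_flatMap]
  rw [List.nil_append]
  apply flatMap_congr_mem
  intro g _
  rw [buckets_getD]
  rfl

-- == the merging scan distributes over the key groups ==

theorem mcpKP_set (l : List Int) (j : Nat) (v : Int) (hj : 2 ≤ j) :
    mcpKP (l.set j v) = mcpKP l := by
  unfold mcpKP mcpG0 mcpG1
  rw [PySem.List.pyGetD_ofNat', PySem.List.pyGetD_ofNat', PySem.List.pyGetD_ofNat',
    PySem.List.pyGetD_ofNat']
  have h0 : (l.set j v)[0]? = l[0]? := List.getElem?_set_ne (by omega)
  have h1 : (l.set j v)[1]? = l[1]? := List.getElem?_set_ne (by omega)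
  rw [List.getD_eq_getElem?_getD, List.getD_eq_getElem?_getD, List.getD_eq_getElem?_getD,
    List.getD_eq_getElem?_getD, h0, h1]

theorem mcpKP_append2 (cp : List Int) (a b : Int) (h : 2 ≤ cp.length) :
    mcpKP (cp ++ [a, b]) = mcpKP cp := by
  unfold mcpKP mcpG0 mcpG1
  rw [PySem.List.pyGetD_ofNat', PySem.List.pyGetD_ofNat', PySem.List.pyGetD_ofNat',
    PySem.List.pyGetD_ofNat']
  have h0 : (cp ++ [a, b]).getD 0 0 = cp.getD 0 0 := List.getD_append _ _ _ _ (by omega)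
  have h1 : (cp ++ [a, b]).getD 1 0 = cp.getD 1 0 := List.getD_append _ _ _ _ (by omega)
  rw [h0, h1]

theorem upd_kp (lst cp : List Int) (h : 2 ≤ lst.length) :
    mcpKP (PySem.List.pySetD
      (PySem.List.pySetD
        (PySem.List.pySetD lst 3 (PySem.List.pyGetD cp 3 0)) 4
        (min (PySem.List.pyGetD (PySem.List.pySetD lst 3 (PySem.List.pyGetD cp 3 0)) 4 0)
          (PySem.List.pyGetD cp 4 0))) 5
      (max (PySem.List.pyGetD (PySem.List.pySetD
        (PySem.List.pySetD lst 3 (PySem.List.pyGetD cp 3 0)) 4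
        (min (PySem.List.pyGetD (PySem.List.pySetD lst 3 (PySem.List.pyGetD cp 3 0)) 4 0)
          (PySem.List.pyGetD cp 4 0))) 5 0)
        (PySem.List.pyGetD cp 4 0))) = mcpKP lst := by
  rw [PySem.List.pySetD_of_nonneg _ _ (by norm_num), PySem.List.pySetD_of_nonneg _ _ (by norm_num),
    PySem.List.pySetD_of_nonneg _ _ (by norm_num)]
  norm_num
  rw [mcpKP_set _ _ _ (by omega), mcpKP_set _ _ _ (by omega), mcpKP_set _ _ _ (by omega)]

theorem upd_len (lst cp : List Int) :
    (PySem.List.pySetD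
      (PySem.List.pySetD
        (PySem.List.pySetD lst 3 (PySem.List.pyGetD cp 3 0)) 4
        (min (PySem.List.pyGetD (PySem.List.pySetD lst 3 (PySem.List.pyGetD cp 3 0)) 4 0)
          (PySem.List.pyGetD cp 4 0))) 5
      (max (PySem.List.pyGetD (PySem.List.pySetD
        (PySem.List.pySetD lst 3 (PySem.List.pyGetD cp 3 0)) 4
        (min (PySem.List.pyGetD (PySem.List.pySetD lst 3 (PySem.List.pyGetD cp 3 0)) 4 0)
          (PySem.List.pyGetD cp 4 0))) 5 0)
        (PySem.List.pyGetD cp 4 0))).length = lst.length := by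
  rw [PySem.List.pySetD_of_nonneg _ _ (by norm_num), PySem.List.pySetD_of_nonneg _ _ (by norm_num),
    PySem.List.pySetD_of_nonneg _ _ (by norm_num)]
  simp

theorem getLast_concat' {α : Type} (l : List α) (a : α) (h : l ++ [a] ≠ []) :
    (l ++ [a]).getLast h = a := by
  rw [List.getLast_append]
  simp

theorem kp_fst {x y : List Int} (h : mcpKP x = mcpKP y) :
    PySem.List.pyGetD x 0 0 = PySem.List.pyGetD y 0 0 := by
  have := congrArg Prod.fst h
  simpa [mcpKP, mcpG0] using this

theorem kp_snd {x y : List Int} (h : mcpKP x = mcpKP y) :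
    PySem.List.pyGetD x 1 0 = PySem.List.pyGetD y 1 0 := by
  have := congrArg Prod.snd h
  simpa [mcpKP, mcpG1] using this

theorem stepA_shift (acc m : List (List Int)) (cp : List Int) (g : Int × Int)
    (m' : List (List Int)) (lst : List Int) (hm : m = m' ++ [lst])
    (hlast : mcpKP lst = g) (hlen : 5 ≤ lst.length) (hcp : mcpKP cp = g) :
    mcpStepA (acc ++ m) cp = acc ++ mcpStepB m cp := by
  subst hm
  have hassoc : acc ++ (m' ++ [lst]) = (acc ++ m') ++ [lst] := by
    rw [List.append_assoc]
  have e0 := kp_fst (hcp.trans hlast.symm)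
  have e1 := kp_snd (hcp.trans hlast.symm)
  unfold mcpStepA mcpStepB
  rw [hassoc]
  have hlen0 : (((acc ++ m') ++ [lst]).length == 0) = false := by simp
  have hlenB : ((m' ++ [lst]).length != 0) = true := by simp
  rw [hlen0, hlenB]
  simp only [Bool.false_eq_true, if_false, Bool.true_and]
  rw [PySem.List.pyGetD_neg_one_append_singleton, PySem.List.pyGetD_neg_one_append_singleton]
  rw [e0, e1]
  simp only [BEq.rfl, Bool.true_and]
  by_cases hC : (PySem.List.pyGetD cp 2 0 == PySem.List.pyGetD lst 3 0 + 1) = true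
  · rw [hC]
    simp only [if_true]
    rw [List.dropLast_concat, List.dropLast_concat, List.append_assoc]
  · rw [Bool.eq_false_iff.2 hC]
    simp only [Bool.false_eq_true, if_false]
    simp [List.append_assoc]

theorem stepB_inv (m : List (List Int)) (cp : List Int) (g : Int × Int)
    (m' : List (List Int)) (lst : List Int) (hm : m = m' ++ [lst])
    (hlast : mcpKP lst = g) (hlen : 5 ≤ lst.length) (hcp : mcpKP cp = g) (hcplen : 5 ≤ cp.length) :
    ∃ (m'' : List (List Int)) (lst' : List Int),
      mcpStepB m cp = m'' ++ [lst'] ∧ mcpKP lst' = g ∧ 5 ≤ lst'.length := by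
  subst hm
  unfold mcpStepB
  have hlenB : ((m' ++ [lst]).length != 0) = true := by simp
  rw [hlenB]
  simp only [Bool.true_and]
  rw [PySem.List.pyGetD_neg_one_append_singleton]
  by_cases hC : (PySem.List.pyGetD cp 2 0 == PySem.List.pyGetD lst 3 0 + 1) = true
  · rw [hC]
    simp only [if_true]
    rw [List.dropLast_concat]
    refine ⟨m', _, rfl, ?_, ?_⟩
    · rw [upd_kp lst cp (by omega)]; exact hlast
    · rw [upd_len lst cp]; exact hlen
  · rw [Bool.eq_false_iff.2 hC]
    simp only [Bool.false_eq_true, if_false]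
    refine ⟨m' ++ [lst], _, rfl, ?_, ?_⟩
    · rw [mcpKP_append2 _ _ _ (by omega)]; exact hcp
    · rw [List.length_append]; omega

theorem gstep (g : Int × Int) :
    ∀ (ys acc m m' : List (List Int)) (lst : List Int), m = m' ++ [lst] →
      mcpKP lst = g → 5 ≤ lst.length →
      (∀ y ∈ ys, mcpKP y = g ∧ 5 ≤ y.length) →
      ys.foldl mcpStepA (acc ++ m) = acc ++ ys.foldl mcpStepB m ∧
      ∃ (m'' : List (List Int)) (lst' : List Int),
        ys.foldl mcpStepB m = m'' ++ [lst'] ∧ mcpKP lst' = g ∧ 5 ≤ lst'.length := by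
  intro ys
  induction ys with
  | nil =>
    intro acc m m' lst hm hlast hlen _
    exact ⟨rfl, m', lst, hm, hlast, hlen⟩
  | cons cp ys ih =>
    intro acc m m' lst hm hlast hlen hys
    rw [List.foldl_cons, List.foldl_cons]
    rw [stepA_shift acc m cp g m' lst hm hlast hlen (hys cp (by simp)).1]
    obtain ⟨m'', lst', heq, hkp', hlen'⟩ :=
      stepB_inv m cp g m' lst hm hlast hlen (hys cp (by simp)).1 (hys cp (by simp)).2
    exact ih acc (mcpStepB m cp) m'' lst' heq hkp' hlen'
      (fun y hy => hys y (by simp [hy]))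

theorem stepA_start (acc : List (List Int)) (cp : List Int) (g : Int × Int)
    (hacc : acc = [] ∨ ∃ (h : acc ≠ []), mcpKP (acc.getLast h) ≠ g) (hcp : mcpKP cp = g) :
    mcpStepA acc cp = acc ++ [cp ++ [PySem.List.pyGetD cp 4 0, PySem.List.pyGetD cp 4 0]] := by
  rcases hacc with rfl | ⟨h, hne⟩
  · rfl
  · unfold mcpStepA
    have hlen0 : (acc.length == 0) = false := by
      simp [List.length_eq_zero_iff, h]
    rw [hlen0]
    simp only [Bool.false_eq_true, if_false]
    rw [PySem.List.pyGetD_neg_one _ _ h]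
    have hne' : ¬(PySem.List.pyGetD cp 0 0 = PySem.List.pyGetD (acc.getLast h) 0 0 ∧
        PySem.List.pyGetD cp 1 0 = PySem.List.pyGetD (acc.getLast h) 1 0) := by
      rintro ⟨u, v⟩
      apply hne
      rw [← hcp]
      unfold mcpKP mcpG0 mcpG1
      rw [u, v]
    by_cases u : PySem.List.pyGetD cp 0 0 = PySem.List.pyGetD (acc.getLast h) 0 0 <;>
      by_cases v : PySem.List.pyGetD cp 1 0 = PySem.List.pyGetD (acc.getLast h) 1 0
    · exact absurd ⟨u, v⟩ hne'
    all_goals simp [u, v]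

theorem gstart (g : Int × Int) (ys acc : List (List Int))
    (hys : ∀ y ∈ ys, mcpKP y = g ∧ 5 ≤ y.length)
    (hacc : acc = [] ∨ ∃ (h : acc ≠ []), mcpKP (acc.getLast h) ≠ g) :
    ys.foldl mcpStepA acc = acc ++ ys.foldl mcpStepB [] ∧
    (ys ≠ [] → ∃ (m'' : List (List Int)) (lst' : List Int),
      ys.foldl mcpStepB [] = m'' ++ [lst'] ∧ mcpKP lst' = g ∧ 5 ≤ lst'.length) := by
  cases ys with
  | nil => exact ⟨by simp, by simp⟩
  | cons cp ys =>
    have hcp := hys cp (by simp)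
    have h1 : mcpStepA acc cp
        = acc ++ [cp ++ [PySem.List.pyGetD cp 4 0, PySem.List.pyGetD cp 4 0]] :=
      stepA_start acc cp g hacc hcp.1
    have h2 : mcpStepB [] cp
        = [cp ++ [PySem.List.pyGetD cp 4 0, PySem.List.pyGetD cp 4 0]] := by
      unfold mcpStepB
      simp
    have hkpmk : mcpKP (cp ++ [PySem.List.pyGetD cp 4 0, PySem.List.pyGetD cp 4 0]) = g := by
      rw [mcpKP_append2 _ _ _ (by omega)]; exact hcp.1
    have hlenmk : 5 ≤ (cp ++ [PySem.List.pyGetD cp 4 0, PySem.List.pyGetD cp 4 0]).length := by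
      rw [List.length_append]; omega
    rw [List.foldl_cons, List.foldl_cons, h1, h2]
    have := gstep g ys acc [cp ++ [PySem.List.pyGetD cp 4 0, PySem.List.pyGetD cp 4 0]]
      [] _ rfl hkpmk hlenmk (fun y hy => hys y (by simp [hy]))
    exact ⟨this.1, fun _ => this.2⟩

theorem top_loop (xs : List (List Int)) (hpre : ∀ cp ∈ xs, 5 ≤ cp.length) :
    ∀ (gl : List (Int × Int)) (acc : List (List Int)), gl.Nodup →
      (∀ g ∈ gl, g ∈ mcpGroups xs) →
      (acc = [] ∨ ∃ (h : acc ≠ []), mcpKP (acc.getLast h) ∉ gl) →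
      (gl.flatMap (mcpGrp xs)).foldl mcpStepA acc
        = acc ++ gl.flatMap (fun g => (mcpGrp xs g).foldl mcpStepB []) := by
  intro gl
  induction gl with
  | nil => intro acc _ _ _; simp
  | cons g gl ih =>
    intro acc hnd hmem hacc
    rw [List.flatMap_cons, List.foldl_append]
    have hys : ∀ y ∈ mcpGrp xs g, mcpKP y = g ∧ 5 ≤ y.length := by
      intro y hy
      have := mem_grp (xs := xs) (g := g) hy
      exact ⟨this.2, hpre y this.1⟩
    have hgne : mcpGrp xs g ≠ [] := by
      obtain ⟨cp, hcp, hkp⟩ := mem_groups.1 (hmem g (by simp))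
      unfold mcpGrp
      rw [Ne, PySem.List.sorted_eq_nil_iff, List.filter_eq_nil_iff]
      intro h
      exact h cp hcp (by simp [hkp])
    have hacc' : acc = [] ∨ ∃ (h : acc ≠ []), mcpKP (acc.getLast h) ≠ g := by
      rcases hacc with h | ⟨h, hne⟩
      · exact Or.inl h
      · exact Or.inr ⟨h, fun e => hne (e ▸ List.mem_cons_self)⟩
    obtain ⟨heq, hlastinfo⟩ := gstart g (mcpGrp xs g) acc hys hacc'
    rw [heq]
    obtain ⟨m'', lst', hm'', hkp', _⟩ := hlastinfo hgne
    have hscanne : (mcpGrp xs g).foldl mcpStepB [] ≠ [] := by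
      rw [hm'']; simp
    have haccne : acc ++ (mcpGrp xs g).foldl mcpStepB [] ≠ [] := by
      simp [hscanne]
    rw [ih (acc ++ (mcpGrp xs g).foldl mcpStepB []) (List.nodup_cons.1 hnd).2
      (fun g' hg' => hmem g' (by simp [hg']))
      (Or.inr ⟨haccne, by
        have hres : acc ++ (mcpGrp xs g).foldl mcpStepB [] = (acc ++ m'') ++ [lst'] := by
          rw [hm'', ← List.append_assoc]
        rw [List.getLast_congr _ (by simp) hres, getLast_concat', hkp']
        exact (List.nodup_cons.1 hnd).1⟩)]
    rw [List.flatMap_cons]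
    simp [List.append_assoc]

theorem merge_eq_alt (xs : List (List Int)) (hdom : mcpBnd xs)
    (hpre : ∀ cp ∈ xs, 5 ≤ cp.length) :
    merge_contact_pairs xs = merge_contact_pairs_alt xs := by
  show (PySem.List.sorted (PySem.List.sorted (PySem.List.sorted xs mcpG2) mcpG0) mcpG1).foldl
      mcpStepA [] = merge_contact_pairs_alt xs
  have hndg : (mcpGroups xs).Nodup :=
    (PySem.List.sorted_perm (PySem.List.dedup (xs.map mcpKP)) mcpEncP false).symm.nodup
      (PySem.List.nodup_dedup _)
  rw [triple_eq_sortedK xs hdom, ← flat_eq_sortedK xs hdom,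
    top_loop xs hpre (mcpGroups xs) [] hndg (fun g hg => hg) (Or.inl rfl),
    alt_eq_flat xs hdom, List.nil_append]

-- ===== VERDICT (by name: the statement is the Claim_ definition above) =====
theorem merge_contact_pairs_spec : Claim_equal_merge_contact_pairs := by
  intro xs hdom hpre
  unfold Spec_merge_contact_pairs
  apply merge_eq_alt xs _ hpre
  intro cp hcp v hv
  unfold Dom_merge_contact_pairs at hdom
  simp only [List.all_eq_true, pvDomInt, decide_eq_true_eq] at hdom
  exact hdom cp hcp v hv
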